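-- pv_equiv track=rewrite | github.com/clthuang/my-ai-setup | plugins/iflow/hooks/lib/entity_registry/frontmatter.py | _serialize_header
-- ===== SOURCE A (Python) =====
-- FIELD_ORDER = (
--     "entity_uuid",
--     "entity_type_id",
--     "artifact_type",
--     "created_at",
--     "feature_id",
--     "feature_slug",
--     "project_id",
--     "phase",
--     "updated_at",
-- )
--
-- def _serialize_header(header: dict) -> str:
--     """Serialize a header dict to a YAML frontmatter string with --- delimiters.
--
--     Fields in FIELD_ORDER come first (in that order), then any remaining keys.
--     """
--     parts = ["---\n"]
--     field_order_set = set(FIELD_ORDER)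
--     for field in FIELD_ORDER:
--         if field in header:
--             parts.append(f"{field}: {header[field]}\n")
--     for key in header:
--         if key not in field_order_set:
--             parts.append(f"{key}: {header[key]}\n")
--     parts.append("---\n")
--     return "".join(parts)
-- ===== SOURCE B (Python) =====
-- FIELD_ORDER = (
--     "entity_uuid",
--     "entity_type_id",
--     "artifact_type",
--     "created_at",
--     "feature_id",
--     "feature_slug",
--     "project_id",
--     "phase",
--     "updated_at",
-- )
--
-- def _serialize_header(header: dict) -> str:
--     """Serialize a header dict to a YAML frontmatter string with --- delimiters."""
--     priority = {name: i for i, name in enumerate(FIELD_ORDER)}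
--     keys = sorted(header, key=lambda k: priority.get(k, len(FIELD_ORDER)))
--     return "".join(["---\n", *(f"{k}: {header[k]}\n" for k in keys), "---\n"])
-- ===== Notes on version B (the rewrite author's own statement) =====
-- stated objective: idiomatic
-- what changed: Instead of A's two conditional scanning passes (one over FIELD_ORDER, one over the dict keys), B precomputes a name-to-index priority map, orders all keys at once with one stable sort keyed on it (missing names defaulting past the last index so insertion order is kept), and emits every line in a single pass.
import Mathlib
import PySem

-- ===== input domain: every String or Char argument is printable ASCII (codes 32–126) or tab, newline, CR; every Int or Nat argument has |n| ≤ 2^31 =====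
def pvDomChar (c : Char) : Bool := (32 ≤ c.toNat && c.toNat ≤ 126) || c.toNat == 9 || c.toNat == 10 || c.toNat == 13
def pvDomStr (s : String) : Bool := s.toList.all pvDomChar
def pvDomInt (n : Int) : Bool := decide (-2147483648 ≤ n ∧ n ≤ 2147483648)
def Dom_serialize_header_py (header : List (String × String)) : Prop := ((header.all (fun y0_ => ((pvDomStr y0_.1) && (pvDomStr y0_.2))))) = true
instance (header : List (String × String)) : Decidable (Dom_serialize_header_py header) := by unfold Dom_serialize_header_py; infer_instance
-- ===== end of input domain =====

-- B replaces A's two conditional scanning passes by a precomputed priority map, one stable sort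
-- of the keys under it, and a single emitting pass (objective: idiomatic; same output).

def FIELD_ORDER : List String :=
  ["entity_uuid", "entity_type_id", "artifact_type", "created_at", "feature_id",
   "feature_slug", "project_id", "phase", "updated_at"]

-- ===== PORT A =====
def serialize_header_py (header : List (String × String)) : String :=
  let d := PySem.Dict.ofList header
  let parts : List String := ["---\n"]
  let field_order_set : PySem.Set String := PySem.Set.ofList FIELD_ORDER
  let parts := FIELD_ORDER.foldl (fun acc field =>
      if d.contains field then acc ++ [field ++ ": " ++ d.getD field "" ++ "\n"] else acc) parts
  let parts := (PySem.Dict.keys d).foldl (fun acc key =>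
      if !(PySem.Set.contains field_order_set key) then acc ++ [key ++ ": " ++ d.getD key "" ++ "\n"] else acc) parts
  PySem.Str.join "" (parts ++ ["---\n"])

-- ===== PORT B =====
def serialize_header_py_alt (header : List (String × String)) : String :=
  let d := PySem.Dict.ofList header
  let priority : PySem.Dict String Int :=
    (PySem.List.enumerate FIELD_ORDER).foldl (fun p iv => p.insert iv.2 iv.1) PySem.Dict.empty
  let keys := PySem.List.sorted (PySem.Dict.keys d)
    (fun k => priority.getD k (FIELD_ORDER.length : Int))
  PySem.Str.join "" (["---\n"] ++ keys.map (fun k => k ++ ": " ++ d.getD k "" ++ "\n") ++ ["---\n"])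

-- ===== PRECONDITION & SPEC =====
def Spec_serialize_header_py (header : List (String × String)) (out : String) : Prop := out = serialize_header_py_alt header
instance (header : List (String × String)) (out : String) : Decidable (Spec_serialize_header_py header out) := by unfold Spec_serialize_header_py; infer_instance

-- ===== CLAIM (what is proved, stated in full; the proofs are below) =====
def Claim_equal_serialize_header_py : Prop := ∀ (header : List (String × String)), Dom_serialize_header_py header → Spec_serialize_header_py header (serialize_header_py header)

-- ===== LEMMAS AND PROOFS =====

-- The key function B sorts by: index in FIELD_ORDER, default 9 (= FIELD_ORDER.length).
def prio (k : String) : Int :=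
  PySem.Dict.getD ((PySem.List.enumerate FIELD_ORDER).foldl
    (fun p iv => p.insert iv.2 iv.1) PySem.Dict.empty) k 9

lemma prioDict_eq : ((PySem.List.enumerate FIELD_ORDER).foldl
    (fun p iv => p.insert iv.2 iv.1) (PySem.Dict.empty : PySem.Dict String Int)) =
    PySem.Dict.mk [("entity_uuid",0),("entity_type_id",1),("artifact_type",2),("created_at",3),
      ("feature_id",4),("feature_slug",5),("project_id",6),("phase",7),("updated_at",8)] := by decide

lemma prio_of_not_mem (k : String) (h : k ∉ FIELD_ORDER) : prio k = 9 := by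
  simp [FIELD_ORDER] at h
  obtain ⟨h1,h2,h3,h4,h5,h6,h7,h8,h9⟩ := h
  simp [prio, prioDict_eq, PySem.Dict.getD_eq_get?_getD, PySem.Dict.get?_mk_cons,
    Ne.symm h1, Ne.symm h2, Ne.symm h3, Ne.symm h4, Ne.symm h5,
    Ne.symm h6, Ne.symm h7, Ne.symm h8, Ne.symm h9, PySem.Dict.get?]

lemma prio_lt_of_mem (k : String) (h : k ∈ FIELD_ORDER) : prio k < 9 := by
  fin_cases h <;> decide

lemma prio_le (k : String) : prio k ≤ 9 := by
  by_cases h : k ∈ FIELD_ORDER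
  · exact le_of_lt (prio_lt_of_mem k h)
  · exact le_of_eq (prio_of_not_mem k h)

lemma field_order_pairwise : FIELD_ORDER.Pairwise (fun a b => prio a < prio b) := by decide

lemma insertBy_append_of_all {α : Type} (before : α → α → Bool) (x : α) (S T : List α)
    (h : ∀ y ∈ T, before x y = true) :
    PySem.List.insertBy before x (S ++ T) = PySem.List.insertBy before x S ++ T := by
  induction S with
  | nil =>
    cases T with
    | nil => simp [PySem.List.insertBy]
    | cons t ts => simp [PySem.List.insertBy, h t (by simp)]
  | cons s S ih =>
    by_cases hb : before x s = true
    · simp [PySem.List.insertBy, hb]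
    · simp [PySem.List.insertBy, hb] at ih ⊢
      exact ih

-- Stable sort with all keys ≤ M splits into the sorted strictly-low part followed by the
-- keys equal to M in their original order.
lemma sorted_split (kf : String → Int) (M : Int) (ks : List String)
    (hmax : ∀ x ∈ ks, kf x ≤ M) :
    PySem.List.sorted ks kf =
      PySem.List.sorted (ks.filter (fun x => decide (kf x < M))) kf ++
      ks.filter (fun x => decide (kf x = M)) := by
  induction ks using List.reverseRecOn with
  | nil => simp [PySem.List.sorted]
  | append_singleton ks x ih =>
    have hmax' : ∀ y ∈ ks, kf y ≤ M := fun y hy => hmax y (by simp [hy])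
    have hx : kf x ≤ M := hmax x (by simp)
    rw [PySem.List.sorted_eq_foldl_insertBy (ks ++ [x]) kf, List.foldl_append,
        List.foldl_cons, List.foldl_nil, ← PySem.List.sorted_eq_foldl_insertBy, ih hmax']
    by_cases he : kf x = M
    · have hnb : ∀ y ∈ (PySem.List.sorted (ks.filter (fun z => decide (kf z < M))) kf ++
          ks.filter (fun z => decide (kf z = M))), (decide (kf x < kf y)) = false := by
        intro y hy
        simp only [List.mem_append, PySem.List.mem_sorted, List.mem_filter] at hy
        have : kf y ≤ M := by rcases hy with ⟨hy, _⟩ | ⟨hy, _⟩ <;> exact hmax' y hy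
        simp [he]; omega
      rw [PySem.List.insertBy_of_forall_not_before _ _ _ hnb]
      have h1 : List.filter (fun z => decide (kf z < M)) (ks ++ [x]) =
          List.filter (fun z => decide (kf z < M)) ks := by
        simp [List.filter_append, he]
      have h2 : List.filter (fun z => decide (kf z = M)) (ks ++ [x]) =
          List.filter (fun z => decide (kf z = M)) ks ++ [x] := by
        simp [List.filter_append, he]
      rw [h1, h2, List.append_assoc]
    · have hlt : kf x < M := lt_of_le_of_ne hx he
      have h1 : List.filter (fun z => decide (kf z < M)) (ks ++ [x]) =
          List.filter (fun z => decide (kf z < M)) ks ++ [x] := by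
        simp [List.filter_append, hlt]
      have h2 : List.filter (fun z => decide (kf z = M)) (ks ++ [x]) =
          List.filter (fun z => decide (kf z = M)) ks := by
        simp [List.filter_append, he]
      rw [h1, h2, insertBy_append_of_all _ _ _ _ (by
        intro y hy
        simp only [List.mem_filter, decide_eq_true_eq] at hy
        simp [hy.2, hlt])]
      rw [PySem.List.sorted_eq_foldl_insertBy (_ ++ [x]) kf, List.foldl_append,
          List.foldl_cons, List.foldl_nil, ← PySem.List.sorted_eq_foldl_insertBy]

lemma prio_lt_iff (k : String) : prio k < 9 ↔ k ∈ FIELD_ORDER := by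
  constructor
  · intro h; by_contra hm; rw [prio_of_not_mem k hm] at h; omega
  · exact prio_lt_of_mem k

-- The strictly-low part is exactly FIELD_ORDER restricted to present keys.
lemma sorted_low (d : PySem.Dict String String) (hnd : d.keys.Nodup) :
    PySem.List.sorted (d.keys.filter (fun x => decide (prio x < 9))) prio =
      FIELD_ORDER.filter (fun f => d.contains f) := by
  apply PySem.List.sorted_eq_of_perm_of_pairwise_lt
  · rw [List.perm_ext_iff_of_nodup (List.Nodup.filter _ (by decide)) (List.Nodup.filter _ hnd)]
    intro k
    simp only [List.mem_filter, decide_eq_true_eq, prio_lt_iff,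
      ← PySem.Dict.contains_iff_mem_keys]
    tauto
  · exact List.Pairwise.sublist List.filter_sublist field_order_pairwise

theorem main (header : List (String × String)) :
    serialize_header_py header = serialize_header_py_alt header := by
  unfold serialize_header_py serialize_header_py_alt
  simp only []
  set d := PySem.Dict.ofList header with hd
  have hkeyfun : (fun k => PySem.Dict.getD ((PySem.List.enumerate FIELD_ORDER).foldl
      (fun p iv => p.insert iv.2 iv.1) PySem.Dict.empty) k (FIELD_ORDER.length : Int)) = prio := by
    funext k; rfl
  rw [hkeyfun]
  rw [PySem.List.foldl_append_if, PySem.List.foldl_append_if]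
  rw [sorted_split prio 9 d.keys (fun x _ => prio_le x),
      sorted_low d (PySem.Dict.nodup_keys_ofList header)]
  have hfc : d.keys.filter (fun x => decide (prio x = 9)) =
      d.keys.filter (fun key => !(PySem.Set.contains (PySem.Set.ofList FIELD_ORDER) key)) := by
    apply List.filter_congr
    intro x _
    by_cases hm : x ∈ FIELD_ORDER
    · have : prio x < 9 := prio_lt_of_mem x hm
      simp [PySem.Set.mem_ofList, hm]
      omega
    · simp [prio_of_not_mem x hm, PySem.Set.mem_ofList, hm]
  rw [hfc]
  simp [List.map_append]

-- ===== VERDICT (by name: the statement is the Claim_ definition above) =====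
theorem serialize_header_py_spec : Claim_equal_serialize_header_py := by
  intro header _
  unfold Spec_serialize_header_py
  exact main header
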